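-- pv_equiv track=rewrite | github.com/KFClpy/KFC | test2/main.py | judge_num_connect
-- ===== SOURCE A (Python) =====
-- def judge_num_connect(num_list):
--     count=0
--     while count<len(num_list[1])-4:
--         if num_list[1][count]==num_list[1][count+1]+1 and num_list[1][count+1]==num_list[1][count+2]+1 and num_list[1][count+2]==num_list[1][count+3]+1 and num_list[1][count+3]==num_list[1][count+4]+1 :
--             return True
--         count+=1
--     else :
--         return False
-- ===== SOURCE B (Python) =====
-- def judge_num_connect(num_list):
--     arr = num_list[1]
--     run = 1
--     prev = None
--     for x in arr:
--         if prev is not None and prev == x + 1: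
--             run += 1
--             if run >= 5:
--                 return True
--         else:
--             run = 1
--         prev = x
--     return False
-- ===== Notes on version B (the rewrite author's own statement) =====
-- stated objective: alternative
-- what changed: Replaces A's index loop that re-tests a full 4-comparison window at every position with a single pass maintaining a run-length counter of the current descending-by-1 streak, returning True as soon as the run reaches 5.
import Mathlib
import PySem

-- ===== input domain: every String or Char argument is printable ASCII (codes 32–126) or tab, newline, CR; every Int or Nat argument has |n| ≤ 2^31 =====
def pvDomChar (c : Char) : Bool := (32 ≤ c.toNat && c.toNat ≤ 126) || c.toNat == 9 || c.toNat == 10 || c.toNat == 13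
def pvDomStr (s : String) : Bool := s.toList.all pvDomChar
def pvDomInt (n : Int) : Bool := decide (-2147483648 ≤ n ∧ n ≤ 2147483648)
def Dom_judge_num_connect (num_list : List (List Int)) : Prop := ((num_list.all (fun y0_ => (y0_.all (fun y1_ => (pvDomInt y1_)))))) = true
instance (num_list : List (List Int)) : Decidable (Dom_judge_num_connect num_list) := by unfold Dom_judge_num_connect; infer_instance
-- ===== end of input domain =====

-- B replaces A's per-index 4-comparison window test with a single pass keeping a run counter; equal on all inputs where A returns (num_list has at least 2 elements).

-- ===== PORT A =====
-- while-loop of A: count from 0 while count < len(arr)-4, testing the 5-element window.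
-- Indices count..count+4 are provably in range when the guard holds, so Python's
-- arr[count+i] never raises here; we read them with pyGet? (exact) and default 0.
def judge_num_connect_loopA (arr : List Int) (count : Nat) : Bool :=
  if h : (count : Int) < (arr.length : Int) - 4 then
    if (PySem.List.pyGet? arr (count : Int)).getD 0 == (PySem.List.pyGet? arr ((count : Int) + 1)).getD 0 + 1
       && (PySem.List.pyGet? arr ((count : Int) + 1)).getD 0 == (PySem.List.pyGet? arr ((count : Int) + 2)).getD 0 + 1
       && (PySem.List.pyGet? arr ((count : Int) + 2)).getD 0 == (PySem.List.pyGet? arr ((count : Int) + 3)).getD 0 + 1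
       && (PySem.List.pyGet? arr ((count : Int) + 3)).getD 0 == (PySem.List.pyGet? arr ((count : Int) + 4)).getD 0 + 1 then
      true
    else
      judge_num_connect_loopA arr (count + 1)
  else
    false
termination_by arr.length - count
decreasing_by omega

def judge_num_connect (num_list : List (List Int)) : Bool :=
  -- num_list[1]; Pre_ guarantees it exists (Python raises IndexError otherwise)
  let arr := (PySem.List.pyGet? num_list 1).getD []
  judge_num_connect_loopA arr 0

-- ===== PORT B =====
-- for x in arr: track prev (None before the first element) and the current run length.
def judge_num_connect_loopB (l : List Int) (prev : Option Int) (run : Nat) : Bool :=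
  match l with
  | [] => false
  | x :: rest =>
    if (match prev with | some p => p == x + 1 | none => false) then
      if run + 1 ≥ 5 then true
      else judge_num_connect_loopB rest (some x) (run + 1)
    else judge_num_connect_loopB rest (some x) 1

def judge_num_connect_alt (num_list : List (List Int)) : Bool :=
  let arr := (PySem.List.pyGet? num_list 1).getD []
  judge_num_connect_loopB arr none 1

-- ===== PRECONDITION & SPEC =====
-- Pre_ excludes exactly the inputs where Python's num_list[1] raises IndexError (both A and B raise there).
def Pre_judge_num_connect (num_list : List (List Int)) : Prop := 2 ≤ num_list.length
instance (num_list : List (List Int)) : Decidable (Pre_judge_num_connect num_list) := by unfold Pre_judge_num_connect; infer_instance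
def pvWitness_judge_num_connect : List (List Int) := [[1], [5, 4, 3, 2, 1]]

def Spec_judge_num_connect (num_list : List (List Int)) (out : Bool) : Prop := out = judge_num_connect_alt num_list
instance (num_list : List (List Int)) (out : Bool) : Decidable (Spec_judge_num_connect num_list out) := by unfold Spec_judge_num_connect; infer_instance

-- ===== CLAIM (what is proved, stated in full; the proofs are below) =====
def Claim_equal_judge_num_connect : Prop := ∀ (num_list : List (List Int)), Dom_judge_num_connect num_list → Pre_judge_num_connect num_list → Spec_judge_num_connect num_list (judge_num_connect num_list)

-- ===== LEMMAS AND PROOFS =====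

-- common specification: descN l n = the first n adjacent pairs of l descend by 1
def descN : List Int → Nat → Bool
  | _, 0 => true
  | a :: b :: rest, n + 1 => a == b + 1 && descN (b :: rest) n
  | _, _ + 1 => false

-- W l = some window of 5 consecutive descending-by-1 numbers occurs in l
def specW : List Int → Bool
  | [] => false
  | a :: rest => descN (a :: rest) 4 || specW rest

theorem descN_mono : ∀ (l : List Int) (n k : Nat), k ≤ n → descN l n = true → descN l k = true := by
  intro l n
  induction n generalizing l with
  | zero => intro k hk _; interval_cases k; simp [descN]
  | succ m ih =>
    intro k hk h
    cases k with
    | zero => simp [descN]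
    | succ j =>
      match l with
      | [] => simp [descN] at h
      | [a] => simp [descN] at h
      | a :: b :: rest =>
        simp [descN] at h ⊢
        exact ⟨h.1, ih _ _ (by omega) h.2⟩

theorem loopB_eq (l : List Int) : ∀ (p : Int) (run : Nat), 1 ≤ run → run ≤ 4 →
    (judge_num_connect_loopB l (some p) run = true ↔
      (descN (p :: l) (5 - run) = true ∨ specW l = true)) := by
  induction l with
  | nil =>
    intro p run h1 h4
    simp only [judge_num_connect_loopB, specW]
    constructor
    · intro h; exact absurd h (by simp)
    · rintro (h | h)
      · have : 5 - run = (4 - run) + 1 := by omega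
        rw [this] at h
        match (4 - run : Nat), h with
        | n, h => simp [descN] at h
      · exact absurd h (by simp)
  | cons x rest ih =>
    intro p run h1 h4
    by_cases hpx : p = x + 1
    · by_cases hrun : run = 4
      · subst hrun
        simp only [judge_num_connect_loopB, hpx]
        constructor
        · intro _
          left
          show descN ((x + 1) :: x :: rest) 1 = true
          simp [descN]
        · intro _; simp
      · have h3 : run ≤ 3 := by omega
        have hstep : judge_num_connect_loopB (x :: rest) (some p) run =
            judge_num_connect_loopB rest (some x) (run + 1) := by
          simp only [judge_num_connect_loopB, hpx]
          simp
          omega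
        rw [hstep, ih x (run + 1) (by omega) (by omega)]
        have h5 : 5 - run = (4 - run) + 1 := by omega
        have h54 : 5 - (run + 1) = 4 - run := by omega
        constructor
        · rintro (h | h)
          · left
            rw [h5]
            subst hpx
            simp only [descN]
            simp [h54] at h
            simp [h]
          · right
            show specW (x :: rest) = true
            simp only [specW]
            simp [h]
        · rintro (h | h)
          · rw [h5] at h
            subst hpx
            simp only [descN] at h
            simp at h
            left
            rw [h54]
            exact h
          · simp only [specW] at h
            simp at h
            rcases h with h | h
            · left
              rw [h54]
              exact descN_mono _ 4 (4 - run) (by omega) h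
            · right; exact h
    · have hstep : judge_num_connect_loopB (x :: rest) (some p) run =
          judge_num_connect_loopB rest (some x) 1 := by
        simp only [judge_num_connect_loopB]
        simp [hpx]
      rw [hstep, ih x 1 (by omega) (by omega)]
      have hd : descN (p :: x :: rest) (5 - run) = false := by
        have h5 : 5 - run = (4 - run) + 1 := by omega
        rw [h5]
        simp [descN, hpx]
      constructor
      · rintro (h | h)
        · right
          show specW (x :: rest) = true
          simp only [specW]
          simp [h]
        · right
          simp only [specW]
          simp [h]
      · rintro (h | h)
        · rw [hd] at h; exact absurd h (by simp)
        · simp only [specW] at h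
          simp at h
          rcases h with h | h
          · left; exact h
          · right; exact h

theorem drop5 (arr : List Int) (count : Nat) (h : count + 4 < arr.length) :
    arr.drop count = arr[count] :: arr[count+1] :: arr[count+2] :: arr[count+3] :: arr[count+4] :: arr.drop (count + 5) := by
  rw [List.drop_eq_getElem_cons (by omega), List.drop_eq_getElem_cons (show count + 1 < arr.length by omega),
      List.drop_eq_getElem_cons (show count + 2 < arr.length by omega),
      List.drop_eq_getElem_cons (show count + 3 < arr.length by omega),
      List.drop_eq_getElem_cons (show count + 4 < arr.length by omega)]

theorem pyGetD_in (arr : List Int) (i : Nat) (h : i < arr.length) :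
    (PySem.List.pyGet? arr (i : Int)).getD 0 = arr[i] := by
  rw [PySem.List.pyGet?_natCast]
  simp [List.getElem?_eq_getElem h]

theorem loopA_eq (arr : List Int) : ∀ (count : Nat), judge_num_connect_loopA arr count = specW (arr.drop count) := by
  intro count
  fun_induction judge_num_connect_loopA arr count with
  | case1 count h hw =>
    -- window found
    have hlen : count + 4 < arr.length := by omega
    rw [drop5 arr count hlen]
    simp only [specW]
    have e0 := pyGetD_in arr count (by omega)
    have e1 := pyGetD_in arr (count + 1) (by omega)
    have e2 := pyGetD_in arr (count + 2) (by omega)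
    have e3 := pyGetD_in arr (count + 3) (by omega)
    have e4 := pyGetD_in arr (count + 4) (by omega)
    have e1' : (PySem.List.pyGet? arr ((count : Int) + 1)).getD 0 = arr[count+1] := by
      rw [show ((count : Int) + 1) = ((count + 1 : Nat) : Int) by push_cast; ring]; exact e1
    have e2' : (PySem.List.pyGet? arr ((count : Int) + 2)).getD 0 = arr[count+2] := by
      rw [show ((count : Int) + 2) = ((count + 2 : Nat) : Int) by push_cast; ring]; exact e2
    have e3' : (PySem.List.pyGet? arr ((count : Int) + 3)).getD 0 = arr[count+3] := by
      rw [show ((count : Int) + 3) = ((count + 3 : Nat) : Int) by push_cast; ring]; exact e3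
    have e4' : (PySem.List.pyGet? arr ((count : Int) + 4)).getD 0 = arr[count+4] := by
      rw [show ((count : Int) + 4) = ((count + 4 : Nat) : Int) by push_cast; ring]; exact e4
    rw [e0, e1', e2', e3', e4'] at hw
    simp at hw
    simp [descN, hw]
  | case2 count h hw ih =>
    have hlen : count + 4 < arr.length := by omega
    have h1 : arr.drop count = arr[count] :: arr.drop (count + 1) :=
      List.drop_eq_getElem_cons (by omega)
    have hdrop : arr.drop (count + 1) = arr[count+1] :: arr[count+2] :: arr[count+3] :: arr[count+4] :: arr.drop (count + 5) := by
      rw [List.drop_eq_getElem_cons (show count + 1 < arr.length by omega),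
          List.drop_eq_getElem_cons (show count + 2 < arr.length by omega),
          List.drop_eq_getElem_cons (show count + 3 < arr.length by omega),
          List.drop_eq_getElem_cons (show count + 4 < arr.length by omega)]
    have e0 := pyGetD_in arr count (by omega)
    have e1' : (PySem.List.pyGet? arr ((count : Int) + 1)).getD 0 = arr[count+1] := by
      rw [show ((count : Int) + 1) = ((count + 1 : Nat) : Int) by push_cast; ring]
      exact pyGetD_in arr (count + 1) (by omega)
    have e2' : (PySem.List.pyGet? arr ((count : Int) + 2)).getD 0 = arr[count+2] := by
      rw [show ((count : Int) + 2) = ((count + 2 : Nat) : Int) by push_cast; ring]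
      exact pyGetD_in arr (count + 2) (by omega)
    have e3' : (PySem.List.pyGet? arr ((count : Int) + 3)).getD 0 = arr[count+3] := by
      rw [show ((count : Int) + 3) = ((count + 3 : Nat) : Int) by push_cast; ring]
      exact pyGetD_in arr (count + 3) (by omega)
    have e4' : (PySem.List.pyGet? arr ((count : Int) + 4)).getD 0 = arr[count+4] := by
      rw [show ((count : Int) + 4) = ((count + 4 : Nat) : Int) by push_cast; ring]
      exact pyGetD_in arr (count + 4) (by omega)
    rw [e0, e1', e2', e3', e4'] at hw
    simp at hw
    rw [ih, h1]
    simp only [specW]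
    have hfalse : descN (arr[count] :: arr.drop (count + 1)) 4 = false := by
      rw [hdrop]
      simp only [descN]
      simp
      tauto
    rw [hfalse]
    simp
  | case3 count h =>
    have : arr.length ≤ count + 4 := by omega
    have hlen : (arr.drop count).length ≤ 4 := by simp; omega
    match hm : arr.drop count, hlen with
    | [], _ => rfl
    | [a], _ => simp [specW, descN]
    | [a,b], _ => simp [specW, descN]
    | [a,b,c], _ => simp [specW, descN]
    | [a,b,c,d], _ => simp [specW, descN]
    | a::b::c::d::e::rest, hl => (exfalso; simp at hl; omega)

theorem main_eq (arr : List Int) : judge_num_connect_loopA arr 0 = judge_num_connect_loopB arr none 1 := by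
  rw [loopA_eq arr 0, List.drop_zero]
  cases arr with
  | nil => rfl
  | cons x rest =>
    have hstep : judge_num_connect_loopB (x :: rest) none 1 = judge_num_connect_loopB rest (some x) 1 := by
      simp [judge_num_connect_loopB]
    rw [hstep]
    simp only [specW]
    by_cases hrest1 : judge_num_connect_loopB rest (some x) 1 = true
    · rw [hrest1]
      rcases (loopB_eq rest x 1 (by omega) (by omega)).mp hrest1 with h | h
      · simp [h]
      · simp [h]
    · have hf : judge_num_connect_loopB rest (some x) 1 = false := by
        cases hb : judge_num_connect_loopB rest (some x) 1
        · rfl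
        · exact absurd hb hrest1
      rw [hf]
      have := loopB_eq rest x 1 (by omega) (by omega)
      rw [hf] at this
      simp at this
      simp [this.1, this.2]

-- ===== VERDICT (by name: the statement is the Claim_ definition above) =====
theorem judge_num_connect_spec : Claim_equal_judge_num_connect := by
  intro num_list _ _
  unfold Spec_judge_num_connect judge_num_connect judge_num_connect_alt
  exact main_eq _
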